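-- pv_equiv track=rewrite | github.com/MurariAmbati/mathematical-systems | music-math-engine/src/math_music_engine/generators/fractal_melody.py | generate_dragon_curve_melody
-- ===== SOURCE A (Python) =====
-- from typing import Dict, List, Optional, Any, Tuple
--
-- def generate_dragon_curve_melody(
--
--     iterations: int,
--     turn_interval: int = 3
-- ) -> List[int]:
--     """
--     Generate melody based on dragon curve.
--
--     Args:
--         iterations: Number of iterations
--         turn_interval: Interval for each turn (in semitones)
--
--     Returns:
--         List of MIDI note intervals
--     """
--     # Dragon curve: each iteration adds turns
--     def dragon_sequence(n: int) -> List[int]: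
--         if n == 0:
--             return [1]
--
--         prev = dragon_sequence(n - 1)
--         # Dragon curve: prev + [1] + reverse(invert(prev))
--         inverted = [-x for x in prev]
--         return prev + [1] + inverted[::-1]
--
--     turns = dragon_sequence(iterations)
--     # Convert turns to intervals
--     melody = [turn_interval * turn for turn in turns]
--
--     return melody
-- ===== SOURCE B (Python) =====
-- def generate_dragon_curve_melody(iterations, turn_interval=3):
--     """Closed-form regular paperfolding sequence: one pass, no recursion.
--
--     The k-th turn (1-based) of the dragon curve is +1 when the odd part of k
--     is congruent to 1 mod 4, and -1 when it is congruent to 3 mod 4.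
--     """
--     melody = []
--     for k in range(1, 2 ** (iterations + 1)):
--         m = k
--         while m % 2 == 0:
--             m //= 2
--         melody.append(turn_interval if m % 4 == 1 else -turn_interval)
--     return melody
-- ===== Notes on version B (the rewrite author's own statement) =====
-- stated objective: alternative
-- what changed: Replaces the recursive prev + [1] + reverse(invert(prev)) list construction with a single pass over k = 1 .. 2**(iterations+1)-1 using the paperfolding closed form (turn decided by the odd part of k mod 4), with no recursion and no intermediate reversed/inverted lists.
import Mathlib
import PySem

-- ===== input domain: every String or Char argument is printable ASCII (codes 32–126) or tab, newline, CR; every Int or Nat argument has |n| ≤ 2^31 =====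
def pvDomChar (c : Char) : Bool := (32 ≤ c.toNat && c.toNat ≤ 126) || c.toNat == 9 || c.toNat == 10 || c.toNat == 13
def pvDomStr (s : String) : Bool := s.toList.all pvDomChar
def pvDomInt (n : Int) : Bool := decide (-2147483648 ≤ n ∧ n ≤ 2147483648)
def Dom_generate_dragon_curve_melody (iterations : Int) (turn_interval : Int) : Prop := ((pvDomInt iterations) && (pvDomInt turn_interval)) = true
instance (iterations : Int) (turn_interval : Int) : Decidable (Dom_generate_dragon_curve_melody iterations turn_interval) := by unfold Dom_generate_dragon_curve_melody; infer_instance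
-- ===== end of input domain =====

-- B replaces A's recursive prev + [1] + reverse(invert(prev)) build by a single pass
-- using the paperfolding closed form (turn from the odd part of the index mod 4).

-- ===== PORT A =====
-- inner helper dragon_sequence; recursion is on the Nat depth (A only returns for iterations ≥ 0, see Pre_)
def dragonSequence (n : Nat) : List Int :=
  match n with
  | 0 => [1]
  | Nat.succ m =>
    let prev := dragonSequence m
    let inverted := prev.map (fun x => -x)
    prev ++ [1] ++ inverted.reverse

def generate_dragon_curve_melody (iterations : Int) (turn_interval : Int) : List Int :=
  let turns := dragonSequence iterations.toNat
  turns.map (fun turn => turn_interval * turn)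

-- ===== PORT B =====
-- the inner 'while m % 2 == 0: m //= 2' loop (guard makes it total; B only runs it on m ≥ 1)
def oddPart (m : Nat) : Nat :=
  if h : m ≠ 0 ∧ m % 2 = 0 then oddPart (m / 2) else m
  termination_by m
  decreasing_by exact Nat.div_lt_self (Nat.pos_of_ne_zero h.1) (by omega)

def generate_dragon_curve_melody_alt (iterations : Int) (turn_interval : Int) : List Int :=
  (List.range' 1 (2 ^ (iterations.toNat + 1) - 1)).map
    (fun k => if oddPart k % 4 = 1 then turn_interval else -turn_interval)

-- ===== PRECONDITION & SPEC =====
-- Pre_ excludes exactly the inputs where the Python A raises: iterations < 0 never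
-- reaches the base case of dragon_sequence and raises RecursionError.
def Pre_generate_dragon_curve_melody (iterations : Int) (turn_interval : Int) : Prop := 0 ≤ iterations
instance (iterations : Int) (turn_interval : Int) : Decidable (Pre_generate_dragon_curve_melody iterations turn_interval) := by unfold Pre_generate_dragon_curve_melody; infer_instance

def pvWitness_generate_dragon_curve_melody : Int × Int := (3, 4)

def Spec_generate_dragon_curve_melody (iterations : Int) (turn_interval : Int) (out : List Int) : Prop := out = generate_dragon_curve_melody_alt iterations turn_interval
instance (iterations : Int) (turn_interval : Int) (out : List Int) : Decidable (Spec_generate_dragon_curve_melody iterations turn_interval out) := by unfold Spec_generate_dragon_curve_melody; infer_instance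

-- ===== CLAIM (what is proved, stated in full; the proofs are below) =====
def Claim_equal_generate_dragon_curve_melody : Prop := ∀ (iterations : Int) (turn_interval : Int), Dom_generate_dragon_curve_melody iterations turn_interval → Pre_generate_dragon_curve_melody iterations turn_interval → Spec_generate_dragon_curve_melody iterations turn_interval (generate_dragon_curve_melody iterations turn_interval)

-- ===== LEMMAS AND PROOFS =====

-- the paperfolding turn at index k (the ±1 value; B multiplies by turn_interval)
def turnI (k : Nat) : Int := if oddPart k % 4 = 1 then 1 else -1

theorem oddPart_odd {m : Nat} (h : m % 2 = 1) : oddPart m = m := by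
  unfold oddPart; simp [h]

theorem oddPart_two_mul {m : Nat} (h : m ≠ 0) : oddPart (2 * m) = oddPart m := by
  rw [oddPart]
  simp [Nat.mul_div_cancel_left m (by norm_num : 0 < 2), h]

theorem turnI_two_mul {m : Nat} (h : m ≠ 0) : turnI (2 * m) = turnI m := by
  unfold turnI; rw [oddPart_two_mul h]

theorem oddPart_two_pow (k : Nat) : oddPart (2 ^ k) = 1 := by
  induction k with
  | zero => simp [oddPart]
  | succ k ih => rw [pow_succ, mul_comm, oddPart_two_mul (by positivity), ih]

-- core reflection identity: turn (2^(n+2) - j) = - turn j for 0 < j < 2^(n+1)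
theorem turnI_reflect : ∀ (n j : Nat), 0 < j → j < 2 ^ (n + 1) →
    turnI (2 ^ (n + 2) - j) = - turnI j := by
  intro n
  induction n with
  | zero =>
    intro j h1 h2
    interval_cases j
    have h3 : oddPart (2 ^ (0 + 2) - 1) = 3 := oddPart_odd (by norm_num)
    have h1' : oddPart 1 = 1 := oddPart_odd (by norm_num)
    unfold turnI
    rw [h3, h1']
    norm_num
  | succ n ih =>
    intro j h1 h2
    rcases Nat.even_or_odd j with ⟨j', hj⟩ | hodd
    · -- even: halve both sides and use the IH
      have hj' : j = 2 * j' := by omega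
      subst hj'
      have h0 : j' ≠ 0 := by omega
      have hlt : j' < 2 ^ (n + 1) := by
        have : 2 * j' < 2 * 2 ^ (n + 1) := by rw [← pow_succ']; omega
        omega
      have hsub : 2 ^ (n + 1 + 2) - 2 * j' = 2 * (2 ^ (n + 2) - j') := by
        have : 2 ^ (n + 1 + 2) = 2 * 2 ^ (n + 2) := by rw [← pow_succ']
        have hle : j' ≤ 2 ^ (n + 2) := le_of_lt (lt_trans hlt (by
          exact Nat.pow_lt_pow_right (by norm_num) (by omega)))
        omega
      rw [hsub, turnI_two_mul (by
        have : j' < 2 ^ (n + 2) := lt_trans hlt (Nat.pow_lt_pow_right (by norm_num) (by omega))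
        omega), turnI_two_mul h0]
      exact ih j' (by omega) hlt
    · -- odd: both sides are their own odd part; compare mod 4
      have hmod : j % 2 = 1 := Nat.odd_iff.mp hodd
      have hpow : 2 ^ (n + 1 + 2) = 4 * 2 ^ (n + 1) := by ring
      have hsubodd : (2 ^ (n + 1 + 2) - j) % 2 = 1 := by omega
      unfold turnI
      rw [oddPart_odd hmod, oddPart_odd hsubodd]
      have h4 : (2 ^ (n + 1 + 2) - j) % 4 = (4 - j % 4) % 4 := by omega
      split_ifs with ha hb hb <;> omega

theorem turnI_getElem_reflect (P : Nat) (hP : ∃ n, P = 2 ^ (n + 1)) :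
    (List.range' (P + 1) (P - 1)).map turnI
      = ((List.range' 1 (P - 1)).map (fun x => -turnI x)).reverse := by
  obtain ⟨n, rfl⟩ := hP
  apply List.ext_getElem
  · simp
  · intro i h1 h2
    simp only [List.getElem_map, List.getElem_range', List.getElem_reverse]
    simp only [List.length_map, List.length_range'] at h1 h2 ⊢
    simp only [one_mul]
    have hpos : 2 ≤ 2 ^ (n + 1) := by
      have := Nat.one_lt_two_pow_iff (n := n + 1) |>.mpr (by omega)
      omega
    have key := turnI_reflect n (2 ^ (n + 1) - 1 - i) (by omega) (by omega)
    have harg : 2 ^ (n + 2) - (2 ^ (n + 1) - 1 - i) = 2 ^ (n + 1) + 1 + i := by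
      have : 2 ^ (n + 2) = 2 * 2 ^ (n + 1) := by ring
      omega
    rw [harg] at key
    have harg2 : 1 + (2 ^ (n + 1) - 1 - 1 - i) = 2 ^ (n + 1) - 1 - i := by omega
    rw [harg2, key]

-- the dragon sequence equals the paperfolding closed form
theorem dragonSequence_eq (n : Nat) :
    dragonSequence n = (List.range' 1 (2 ^ (n + 1) - 1)).map turnI := by
  induction n with
  | zero =>
    have h1 : oddPart 1 = 1 := oddPart_odd (by norm_num)
    simp [dragonSequence, List.range', turnI, h1]
  | succ n ih =>
    have hpos : 1 ≤ 2 ^ (n + 1) := Nat.one_le_two_pow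
    have hsplit : 2 ^ (n + 1 + 1) - 1
        = (2 ^ (n + 1) - 1) + (1 + (2 ^ (n + 1) - 1)) := by
      have : 2 ^ (n + 1 + 1) = 2 * 2 ^ (n + 1) := by ring
      omega
    have hrange : List.range' 1 (2 ^ (n + 1 + 1) - 1)
        = List.range' 1 (2 ^ (n + 1) - 1)
          ++ List.range' (2 ^ (n + 1)) (1 + (2 ^ (n + 1) - 1)) := by
      rw [hsplit, ← List.range'_append]
      congr 2
      omega
    have hmid : List.range' (2 ^ (n + 1)) (1 + (2 ^ (n + 1) - 1))
        = 2 ^ (n + 1) :: List.range' (2 ^ (n + 1) + 1) (2 ^ (n + 1) - 1) := by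
      rw [Nat.add_comm 1]
      rfl
    show dragonSequence n ++ [1]
        ++ ((dragonSequence n).map (fun x => -x)).reverse = _
    rw [ih, hrange, hmid, List.map_append, List.map_cons]
    have hturn1 : turnI (2 ^ (n + 1)) = 1 := by
      unfold turnI; rw [oddPart_two_pow]; norm_num
    rw [hturn1, turnI_getElem_reflect (2 ^ (n + 1)) ⟨n, rfl⟩, List.map_map]
    simp [Function.comp]

-- ===== VERDICT (by name: the statement is the Claim_ definition above) =====
theorem generate_dragon_curve_melody_spec : Claim_equal_generate_dragon_curve_melody := by
  intro iterations turn_interval _ _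
  unfold Spec_generate_dragon_curve_melody generate_dragon_curve_melody generate_dragon_curve_melody_alt
  rw [dragonSequence_eq, List.map_map]
  apply List.map_congr_left
  intro k _
  simp only [Function.comp, turnI]
  split_ifs <;> ring
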